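-- pv_equiv track=rewrite | github.com/MartinSA04/GameOfLifeText | src/game_of_life_text/gui.py | _suggest_export_name
-- ===== SOURCE A (Python) =====
-- def _suggest_export_name(text: str | None) -> str:
--     """Return a readable default filename for a stable-text export."""
--
--     if text is None:
--         return "stable_text_plan.txt"
--     cleaned = "".join(
--         character.lower() if character.isalnum() else "_" for character in text.strip()
--     )
--     normalized = "_".join(part for part in cleaned.split("_") if part)
--     if not normalized:
--         normalized = "stable_text"
--     return f"{normalized}_plan.txt"
-- ===== SOURCE B (Python) =====
-- def _suggest_export_name(text: str | None) -> str:
--     """Return a readable default filename for a stable-text export."""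
--
--     if text is None:
--         return "stable_text_plan.txt"
--     words = []
--     buffer = []
--     for character in text.strip():
--         if character.isalnum():
--             buffer.append(character.lower())
--         else:
--             if buffer:
--                 words.append("".join(buffer))
--             buffer = []
--     if buffer:
--         words.append("".join(buffer))
--     if not words:
--         normalized = "stable_text"
--     else:
--         normalized = "_".join(words)
--     return f"{normalized}_plan.txt"
-- ===== Notes on version B (the rewrite author's own statement) =====
-- stated objective: simpler
-- what changed: Replaces the build-cleaned-string-then-split-on-'_'-then-filter-then-join pipeline with a single tokenizing pass that maintains a current-word buffer and flushes it on every non-alphanumeric character.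
import Mathlib
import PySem

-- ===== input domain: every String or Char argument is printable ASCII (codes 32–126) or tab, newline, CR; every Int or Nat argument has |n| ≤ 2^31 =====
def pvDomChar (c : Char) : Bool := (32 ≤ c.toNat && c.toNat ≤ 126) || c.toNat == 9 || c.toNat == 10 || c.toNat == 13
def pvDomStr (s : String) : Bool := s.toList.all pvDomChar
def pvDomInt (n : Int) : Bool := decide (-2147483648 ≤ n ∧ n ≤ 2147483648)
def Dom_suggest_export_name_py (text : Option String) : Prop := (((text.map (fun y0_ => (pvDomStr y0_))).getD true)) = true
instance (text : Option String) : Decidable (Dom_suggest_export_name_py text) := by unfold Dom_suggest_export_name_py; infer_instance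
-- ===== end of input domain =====

-- B replaces A's clean-then-split-then-filter-then-join pipeline with a single tokenizing
-- pass over the characters (simpler decomposition, same O(n) cost).

-- ===== PORT A =====
-- per-character `character.lower()` concatenated by "".join = map lowerChar (exact on ASCII)
def suggest_export_name_py (text : Option String) : String :=
  match text with
  | none => "stable_text_plan.txt"
  | some t =>
    let cleaned := (PySem.Chars.strip t.toList).map
      (fun character => if PySem.Chars.isalnum character then PySem.Chars.lowerChar character else '_')
    let normalized := PySem.Chars.join ['_']
      ((PySem.Chars.splitOn cleaned ['_']).filter (fun part => part ≠ []))
    let normalized := if normalized = [] then "stable_text".toList else normalized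
    String.mk (normalized ++ "_plan.txt".toList)

-- ===== PORT B =====
-- the for-loop of Source B: buffer of the current word, flushed on each non-alnum character
def pvTokenize : List Char → List Char → List (List Char)
  | [], buffer => if buffer = [] then [] else [buffer]
  | c :: rest, buffer =>
    if PySem.Chars.isalnum c then pvTokenize rest (buffer ++ [PySem.Chars.lowerChar c])
    else if buffer = [] then pvTokenize rest [] else buffer :: pvTokenize rest []

def suggest_export_name_py_alt (text : Option String) : String :=
  match text with
  | none => "stable_text_plan.txt"
  | some t =>
    let words := pvTokenize (PySem.Chars.strip t.toList) []
    let normalized := if words = [] then "stable_text".toList else PySem.Chars.join ['_'] words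
    String.mk (normalized ++ "_plan.txt".toList)

-- ===== PRECONDITION & SPEC =====
def Spec_suggest_export_name_py (text : Option String) (out : String) : Prop := out = suggest_export_name_py_alt text
instance (text : Option String) (out : String) : Decidable (Spec_suggest_export_name_py text out) := by unfold Spec_suggest_export_name_py; infer_instance

-- ===== CLAIM (what is proved, stated in full; the proofs are below) =====
def Claim_equal_suggest_export_name_py : Prop := ∀ (text : Option String), Dom_suggest_export_name_py text → Spec_suggest_export_name_py text (suggest_export_name_py text)

-- ===== LEMMAS AND PROOFS =====

-- single-character split, accumulator style (characterizes PySem.Chars.splitOn.go for sep = ['_'])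
def pvSplit1 : List Char → List Char → List (List Char)
  | [], cur => [cur.reverse]
  | c :: rest, cur => if c = '_' then cur.reverse :: pvSplit1 rest [] else pvSplit1 rest (c :: cur)

theorem pvGo_eq (l : List Char) : ∀ (fuel : Nat) (cur : List Char) (acc : List (List Char)),
    l.length < fuel →
    PySem.Chars.splitOn.go ['_'] fuel l cur acc = acc.reverse ++ pvSplit1 l cur := by
  induction l with
  | nil =>
    intro fuel cur acc h
    match fuel with
    | fuel + 1 => simp [PySem.Chars.splitOn.go, pvSplit1]
  | cons c rest ih =>
    intro fuel cur acc h
    match fuel with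
    | fuel + 1 =>
      simp only [PySem.Chars.splitOn.go]
      by_cases hc : c = '_'
      · subst hc
        rw [if_pos (show List.isPrefixOf ['_'] ('_' :: rest) = true by simp [List.isPrefixOf])]
        rw [show List.drop (['_'] : List Char).length ('_' :: rest) = rest from rfl]
        rw [ih fuel [] (cur.reverse :: acc) (by simpa using h)]
        simp [pvSplit1]
      · rw [if_neg (show ¬ List.isPrefixOf ['_'] (c :: rest) = true by
          simp [List.isPrefixOf]; exact fun h' => hc h'.symm)]
        rw [ih fuel (c :: cur) acc (by simpa using h)]
        simp [pvSplit1, hc]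

theorem pvLower_ne_underscore (c : Char) (h : PySem.Chars.isalnum c = true) :
    PySem.Chars.lowerChar c ≠ '_' := by
  have hle : ∀ a b : Char, a ≤ b → a.toNat ≤ b.toNat := fun a b hab => Fin.mk_le_mk.mp hab
  have hA : ('A' : Char).toNat = 65 := by decide
  have hZ : ('Z' : Char).toNat = 90 := by decide
  have ha : ('a' : Char).toNat = 97 := by decide
  have hz : ('z' : Char).toNat = 122 := by decide
  have h0 : ('0' : Char).toNat = 48 := by decide
  have h9 : ('9' : Char).toNat = 57 := by decide
  have hus : ('_' : Char).toNat = 95 := by decide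
  simp only [PySem.Chars.isalnum, PySem.Chars.isalpha, PySem.Chars.isupper, PySem.Chars.islower,
    PySem.Chars.isdigit, Bool.or_eq_true, Bool.and_eq_true, decide_eq_true_eq] at h
  simp only [PySem.Chars.lowerChar, PySem.Chars.isupper, Bool.and_eq_true, decide_eq_true_eq]
  intro heq
  have htn := congrArg Char.toNat heq
  split_ifs at htn with hu
  · have hu1 := hle _ _ hu.1
    have hu2 := hle _ _ hu.2
    rw [Char.toNat_ofNat, hus] at htn
    have hvalid : (c.toNat + 32).isValidChar := Or.inl (by rw [hZ] at hu2; omega)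
    rw [if_pos hvalid] at htn
    rw [hA] at hu1; rw [hZ] at hu2
    omega
  · rw [hus] at htn
    rcases h with (hup | hlo) | hdig
    · exact hu hup
    · have h1 := hle _ _ hlo.1
      have h2 := hle _ _ hlo.2
      rw [ha] at h1; rw [hz] at h2; omega
    · have h1 := hle _ _ hdig.1
      have h2 := hle _ _ hdig.2
      rw [h0] at h1; rw [h9] at h2; omega

theorem pvTok_eq (s : List Char) : ∀ (buf : List Char),
    (pvSplit1 (s.map (fun character =>
        if PySem.Chars.isalnum character then PySem.Chars.lowerChar character else '_'))
      buf.reverse).filter (fun part => part ≠ []) = pvTokenize s buf := by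
  induction s with
  | nil =>
    intro buf
    simp only [List.map_nil, pvSplit1, pvTokenize, List.reverse_reverse, List.filter]
    by_cases hb : buf = [] <;> simp [hb]
  | cons c rest ih =>
    intro buf
    simp only [List.map_cons, pvTokenize]
    by_cases ha : PySem.Chars.isalnum c
    · simp only [if_pos ha, pvSplit1, if_neg (pvLower_ne_underscore c ha)]
      rw [show PySem.Chars.lowerChar c :: buf.reverse
            = (buf ++ [PySem.Chars.lowerChar c]).reverse by simp]
      exact ih _
    · simp only [if_neg ha, pvSplit1, List.reverse_reverse]
      by_cases hb : buf = []
      · subst hb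
        simpa using ih []
      · have h0 := ih []
        simp only [List.reverse_nil] at h0
        simp only [List.filter_cons, hb, decide_not, decide_false, Bool.not_false, if_true]
        exact List.cons_eq_cons.mpr ⟨rfl, by simpa using h0⟩

theorem pvTok_ne_nil (s : List Char) : ∀ (buf w : List Char), w ∈ pvTokenize s buf → w ≠ [] := by
  induction s with
  | nil =>
    intro buf w hw
    by_cases hb : buf = [] <;> simp [pvTokenize, hb] at hw
    subst hw; exact hb
  | cons c rest ih =>
    intro buf w hw
    simp only [pvTokenize] at hw
    split_ifs at hw with h1 h2
    · exact ih _ w hw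
    · exact ih _ w hw
    · rcases List.mem_cons.mp hw with h | h
      · subst h; exact h2
      · exact ih _ w h

theorem pvJoin_eq_nil_iff (ws : List (List Char)) (h : ∀ w ∈ ws, w ≠ []) :
    PySem.Chars.join ['_'] ws = [] ↔ ws = [] := by
  match ws with
  | [] => simp [PySem.Chars.join, List.intercalate]
  | [w] =>
    have hw := h w (by simp)
    simp only [PySem.Chars.join, List.intercalate, List.intersperse, List.flatten_cons,
      List.flatten_nil, List.append_nil]
    simp [hw]
  | w :: w' :: ws' =>
    have hw := h w (by simp)
    have hstep : PySem.Chars.join ['_'] (w :: w' :: ws')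
        = w ++ ['_'] ++ PySem.Chars.join ['_'] (w' :: ws') := by
      simp [PySem.Chars.join, List.intercalate, List.intersperse]
    rw [hstep]
    constructor
    · intro heq
      rcases List.append_eq_nil_iff.mp heq with ⟨h1, _⟩
      rcases List.append_eq_nil_iff.mp h1 with ⟨h2, _⟩
      exact absurd h2 hw
    · intro heq; simp at heq

-- ===== VERDICT (by name: the statement is the Claim_ definition above) =====
theorem suggest_export_name_py_spec : Claim_equal_suggest_export_name_py := by
  intro text _
  unfold Spec_suggest_export_name_py suggest_export_name_py suggest_export_name_py_alt
  match text with
  | none => rfl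
  | some t =>
    simp only
    set s := PySem.Chars.strip t.toList with hs
    have hsplit : PySem.Chars.splitOn
        (s.map (fun character =>
          if PySem.Chars.isalnum character then PySem.Chars.lowerChar character else '_')) ['_']
        = pvSplit1 (s.map (fun character =>
          if PySem.Chars.isalnum character then PySem.Chars.lowerChar character else '_')) [] := by
      unfold PySem.Chars.splitOn
      rw [pvGo_eq _ _ _ _ (by omega)]
      simp
    rw [hsplit]
    have htok := pvTok_eq s []
    simp only [List.reverse_nil] at htok
    rw [htok]
    have hnil := pvJoin_eq_nil_iff (pvTokenize s []) (pvTok_ne_nil s [])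
    by_cases hw : pvTokenize s [] = []
    · simp [hw, PySem.Chars.join, List.intercalate]
    · rw [if_neg hw, if_neg (fun hx => hw (hnil.mp hx))]
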